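-- pv_equiv track=rewrite | github.com/Technion-Kishony-lab/amplifinder | amplifinder/steps/jct_coverage/cigar.py | merge_consecutive_cigar_ops
-- ===== SOURCE A (Python) =====
-- from typing import Iterator
--
-- class Cigar(list[tuple[int, int]]):
--     """CIGAR operations with reference position tracking."""
--
--     def iter_with_ref_pos(self, start_pos: int = 0) -> Iterator[tuple[int, int, int]]:
--         """Iterate yielding (op, length, ref_pos) where ref_pos is updated for each operation.
--
--         Args:
--             start_pos: Initial reference position (default 0)
--
--         Yields:
--             (op, length, ref_pos) where ref_pos is the position before consuming this operation
--         """
--         ref_pos = start_pos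
--         for op, length in self:
--             yield op, length, ref_pos
--             # Update ref_pos based on operation type
--             if op in (0, 2, 7, 8):  # M, D, =, X consume reference
--                 ref_pos += length
--             # I (1) does not consume reference
--
--     def has_only_operations(self, allowed_ops: set[int]) -> bool:
--         """Check if all operations are in the allowed set."""
--         return all(op in allowed_ops for op, _ in self)
--
-- def merge_consecutive_cigar_ops(cigar: Cigar) -> Cigar:
--     """Merge consecutive identical CIGAR operations."""
--     merged = Cigar()
--     if not cigar:
--         return merged
--
--     merged.append(cigar[0])
--     for op, length in cigar[1:]:
--         if op == merged[-1][0]: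
--             merged[-1] = (op, merged[-1][1] + length)
--         else:
--             merged.append((op, length))
--
--     return merged
-- ===== SOURCE B (Python) =====
-- class Cigar(list):
--     """Minimal stand-in: merged result is a Cigar (a list of (op, length) tuples)."""
--     pass
--
-- def _merge_dc(xs):
--     """Divide and conquer: merge each half, then join at the single boundary."""
--     if len(xs) <= 1:
--         return xs[:]
--     mid = len(xs) // 2
--     left = _merge_dc(xs[:mid])
--     right = _merge_dc(xs[mid:])
--     if left and right and left[-1][0] == right[0][0]:
--         return left[:-1] + [(left[-1][0], left[-1][1] + right[0][1])] + right[1:]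
--     return left + right
--
-- def merge_consecutive_cigar_ops(cigar):
--     """Merge consecutive identical CIGAR operations (divide-and-conquer)."""
--     merged = Cigar()
--     merged.extend(_merge_dc(list(cigar)))
--     return merged
-- ===== Notes on version B (the rewrite author's own statement) =====
-- stated objective: alternative
-- what changed: Replaces A's left-to-right running accumulator (compare with merged[-1], mutate or append) with a divide-and-conquer recursion: merge each half independently and join the two merged halves at their single boundary, summing lengths if the boundary ops match.
import Mathlib
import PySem

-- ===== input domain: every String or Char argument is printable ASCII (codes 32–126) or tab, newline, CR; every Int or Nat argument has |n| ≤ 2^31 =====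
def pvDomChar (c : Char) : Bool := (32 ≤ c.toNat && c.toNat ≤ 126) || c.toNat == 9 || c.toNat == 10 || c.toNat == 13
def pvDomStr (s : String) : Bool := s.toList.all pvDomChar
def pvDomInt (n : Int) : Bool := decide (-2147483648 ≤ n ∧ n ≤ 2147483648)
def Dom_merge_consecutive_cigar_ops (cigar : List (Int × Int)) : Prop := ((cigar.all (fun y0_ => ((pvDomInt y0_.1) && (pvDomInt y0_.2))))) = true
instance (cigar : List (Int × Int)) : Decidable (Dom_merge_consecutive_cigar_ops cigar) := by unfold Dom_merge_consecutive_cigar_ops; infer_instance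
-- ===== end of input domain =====

-- B replaces A's running mutate-or-append accumulator with a divide-and-conquer merge (alternative decomposition; same results).

-- ===== PORT A =====
-- One loop step of A: compare op with merged[-1][0], then mutate merged[-1] or append.
-- (merged is nonempty throughout the Python loop; the none branch is an unreachable totality guard.)
def mergeA_step (merged : List (Int × Int)) (p : Int × Int) : List (Int × Int) :=
  match merged.getLast? with
  | some last => if p.1 == last.1 then merged.dropLast ++ [(p.1, last.2 + p.2)] else merged ++ [p]
  | none => merged ++ [p]

def merge_consecutive_cigar_ops (cigar : List (Int × Int)) : List (Int × Int) :=
  match cigar with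
  | [] => []
  | c0 :: rest => rest.foldl mergeA_step [c0]

-- ===== PORT B =====
-- Join two already-merged halves: combine the single boundary pair if ops match (Python's `if left and right and left[-1][0] == right[0][0]`).
def joinRuns (L R : List (Int × Int)) : List (Int × Int) :=
  match L.getLast?, R with
  | some last, r0 :: rtail =>
      if last.1 == r0.1 then L.dropLast ++ (last.1, last.2 + r0.2) :: rtail else L ++ R
  | _, _ => L ++ R

-- Divide and conquer: merge each half of the list, then join at the boundary.
def merge_consecutive_cigar_ops_alt (cigar : List (Int × Int)) : List (Int × Int) :=
  if cigar.length ≤ 1 then cigar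
  else
    joinRuns (merge_consecutive_cigar_ops_alt (cigar.take (cigar.length / 2)))
             (merge_consecutive_cigar_ops_alt (cigar.drop (cigar.length / 2)))
termination_by cigar.length
decreasing_by
  · simp only [List.length_take]; omega
  · simp only [List.length_drop]; omega

-- ===== PRECONDITION & SPEC =====
def Spec_merge_consecutive_cigar_ops (cigar : List (Int × Int)) (out : List (Int × Int)) : Prop := out = merge_consecutive_cigar_ops_alt cigar
instance (cigar : List (Int × Int)) (out : List (Int × Int)) : Decidable (Spec_merge_consecutive_cigar_ops cigar out) := by unfold Spec_merge_consecutive_cigar_ops; infer_instance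

-- ===== CLAIM (what is proved, stated in full; the proofs are below) =====
def Claim_equal_merge_consecutive_cigar_ops : Prop := ∀ (cigar : List (Int × Int)), Dom_merge_consecutive_cigar_ops cigar → Spec_merge_consecutive_cigar_ops cigar (merge_consecutive_cigar_ops cigar)

-- ===== LEMMAS AND PROOFS =====
-- Canonical run decomposition: each consecutive run of one op becomes one (op, sum) pair.
-- Both ports are proved equal to `runs`.
def runs : List (Int × Int) → List (Int × Int)
  | [] => []
  | (op, len) :: rest =>
      (op, len + ((rest.takeWhile (fun p => p.1 == op)).map Prod.snd).sum) ::
        runs (rest.dropWhile (fun p => p.1 == op))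
termination_by xs => xs.length
decreasing_by
  simp only [List.length_cons]
  exact Nat.lt_succ_of_le (List.length_dropWhile_le _ _)

theorem runs_ne_nil {a : List (Int × Int)} (h : a ≠ []) : runs a ≠ [] := by
  match a with
  | [] => exact absurd rfl h
  | (op, l) :: rest => simp [runs]

theorem joinRuns_nil_left (R : List (Int × Int)) : joinRuns [] R = R := by
  cases R <;> simp [joinRuns]

theorem joinRuns_cons {L : List (Int × Int)} (x : Int × Int) (R : List (Int × Int))
    (h : L ≠ []) : joinRuns (x :: L) R = x :: joinRuns L R := by
  match L with
  | [] => exact absurd rfl h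
  | y :: L' =>
    cases R with
    | nil => simp [joinRuns]
    | cons r0 rt =>
      simp only [joinRuns, List.getLast?_cons_cons]
      rcases hl : (y :: L').getLast? with _ | last
      · simp at hl
      · dsimp only
        split_ifs <;> simp [List.dropLast_cons₂]

-- A's loop invariant (from the foldl form of A): folding yields acc followed by the runs of the rest.
theorem mergeA_loop_eq (rest : List (Int × Int)) :
    ∀ (acc : List (Int × Int)) (op0 l0 : Int),
      rest.foldl mergeA_step (acc ++ [(op0, l0)]) =
        acc ++ runs ((op0, l0) :: rest) := by
  induction rest with
  | nil =>
    intro acc op0 l0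
    simp [runs]
  | cons p rest ih =>
    intro acc op0 l0
    obtain ⟨op, l⟩ := p
    by_cases h : op = op0
    · subst h
      have hstep : mergeA_step (acc ++ [(op, l0)]) (op, l) = acc ++ [(op, l0 + l)] := by
        simp [mergeA_step]
      rw [List.foldl_cons, hstep, ih acc op (l0 + l)]
      simp [runs, List.takeWhile, List.dropWhile]
      ring
    · have hstep : mergeA_step (acc ++ [(op0, l0)]) (op, l) =
          (acc ++ [(op0, l0)]) ++ [(op, l)] := by
        simp [mergeA_step, h]
      rw [List.foldl_cons, hstep, ih (acc ++ [(op0, l0)]) op l]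
      conv_rhs => rw [runs]
      simp [h]

theorem A_eq_runs (cigar : List (Int × Int)) :
    merge_consecutive_cigar_ops cigar = runs cigar := by
  match cigar with
  | [] => simp [merge_consecutive_cigar_ops, runs]
  | (op0, l0) :: rest =>
    unfold merge_consecutive_cigar_ops
    simpa using mergeA_loop_eq rest [] op0 l0

-- runs distributes over append via the boundary join.
theorem runs_append : ∀ (a b : List (Int × Int)), runs (a ++ b) = joinRuns (runs a) (runs b)
  | [], b => by simp [runs, joinRuns_nil_left]
  | (op, l) :: a', b => by
    by_cases hall : a'.all (fun p => p.1 == op)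
    · -- a is a single run
      have htw : a'.takeWhile (fun p => p.1 == op) = a' := List.takeWhile_eq_self_iff.mpr (by
        intro x hx; exact List.all_eq_true.mp hall x hx)
      have hdw : a'.dropWhile (fun p => p.1 == op) = [] := by
        rw [List.dropWhile_eq_nil_iff]; intro x hx; exact List.all_eq_true.mp hall x hx
      have hruns_a : runs ((op, l) :: a') = [(op, l + (a'.map Prod.snd).sum)] := by
        rw [runs, htw, hdw]; simp [runs]
      have runs_nil : runs ([] : List (Int × Int)) = [] := by simp [runs]
      cases b with
      | nil => rw [List.append_nil, hruns_a, runs_nil]; simp [joinRuns]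
      | cons b0 b' =>
        obtain ⟨op2, l2⟩ := b0
        by_cases hop : op = op2
        · subst hop
          rw [show ((op, l) :: a') ++ ((op, l2) :: b') = (op, l) :: (a' ++ (op, l2) :: b') from rfl]
          rw [runs]
          rw [List.takeWhile_append, List.dropWhile_append, htw, hdw, if_pos rfl]
          simp only [List.isEmpty_nil, if_true, List.nil_append]
          rw [show List.takeWhile (fun p => p.1 == op) ((op, l2) :: b') =
              (op, l2) :: List.takeWhile (fun p => p.1 == op) b' from by simp [List.takeWhile]]
          rw [show List.dropWhile (fun p => p.1 == op) ((op, l2) :: b') =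
              List.dropWhile (fun p => p.1 == op) b' from by simp [List.dropWhile]]
          rw [hruns_a]
          rw [show runs ((op, l2) :: b') =
              (op, l2 + ((b'.takeWhile (fun p => p.1 == op)).map Prod.snd).sum) ::
                runs (b'.dropWhile (fun p => p.1 == op)) from by rw [runs]]
          simp [joinRuns]
          ring
        · rw [show ((op, l) :: a') ++ ((op2, l2) :: b') = (op, l) :: (a' ++ (op2, l2) :: b') from rfl]
          rw [runs]
          rw [List.takeWhile_append, List.dropWhile_append, htw, hdw, if_pos rfl]
          simp only [List.isEmpty_nil, if_true, List.nil_append]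
          have h2 : (op2 == op) = false := beq_eq_false_iff_ne.mpr (Ne.symm hop)
          rw [show List.takeWhile (fun p => p.1 == op) ((op2, l2) :: b') = [] from by
            simp [List.takeWhile, h2]]
          rw [show List.dropWhile (fun p => p.1 == op) ((op2, l2) :: b') = (op2, l2) :: b' from by
            simp [List.dropWhile, h2]]
          rw [hruns_a]
          rw [show runs ((op2, l2) :: b') =
              (op2, l2 + ((b'.takeWhile (fun p => p.1 == op2)).map Prod.snd).sum) ::
                runs (b'.dropWhile (fun p => p.1 == op2)) from by rw [runs]]
          simp [joinRuns, hop]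
    · -- a' contains a run break: the head run lies inside a
      have hdw_ne : a'.dropWhile (fun p => p.1 == op) ≠ [] := by
        intro hnil
        apply hall
        rw [List.all_eq_true]
        intro x hx
        rw [List.dropWhile_eq_nil_iff] at hnil
        exact hnil x hx
      have hlen : (a'.dropWhile (fun p => p.1 == op)).length < a'.length + 1 :=
        Nat.lt_succ_of_le (List.length_dropWhile_le _ _)
      rw [show ((op, l) :: a') ++ b = (op, l) :: (a' ++ b) from rfl]
      rw [runs]
      have htw_ne : (a'.takeWhile (fun p => p.1 == op)).length ≠ a'.length := by
        intro he
        apply hall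
        rw [List.all_eq_true]
        intro x hx
        have hpref := (List.takeWhile_prefix (p := fun p => p.1 == op) (l := a')).eq_of_length he
        have hx' : x ∈ List.takeWhile (fun p => p.1 == op) a' := by rw [hpref]; exact hx
        exact List.mem_takeWhile_imp (p := fun q : Int × Int => q.1 == op) hx'
      have hiE : ¬ ((a'.dropWhile (fun p => p.1 == op)).isEmpty = true) := by
        simp only [List.isEmpty_iff]; exact hdw_ne
      rw [List.takeWhile_append, List.dropWhile_append, if_neg htw_ne, if_neg hiE]
      rw [runs_append (a'.dropWhile (fun p => p.1 == op)) b]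
      conv_rhs => rw [runs]
      rw [joinRuns_cons _ _ (runs_ne_nil hdw_ne)]
termination_by a _ => a.length
decreasing_by
  simp only [List.length_cons]
  exact hlen

theorem B_eq_runs : ∀ (cigar : List (Int × Int)),
    merge_consecutive_cigar_ops_alt cigar = runs cigar := fun cigar => by
  by_cases h : cigar.length ≤ 1
  · rw [merge_consecutive_cigar_ops_alt, if_pos h]
    match cigar with
    | [] => simp [runs]
    | [(op, l)] => simp [runs]
    | x :: y :: t => simp at h
  · rw [merge_consecutive_cigar_ops_alt, if_neg h]
    rw [B_eq_runs (cigar.take (cigar.length / 2)), B_eq_runs (cigar.drop (cigar.length / 2))]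
    rw [← runs_append, List.take_append_drop]
termination_by cigar => cigar.length
decreasing_by
  · simp only [List.length_take]; omega
  · simp only [List.length_drop]; omega

-- ===== VERDICT (by name: the statement is the Claim_ definition above) =====
theorem merge_consecutive_cigar_ops_spec : Claim_equal_merge_consecutive_cigar_ops := by
  intro cigar _
  unfold Spec_merge_consecutive_cigar_ops
  rw [A_eq_runs, B_eq_runs]
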